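-- pv_equiv track=rewrite | github.com/firebase/FirebaseUI-Android | scripts/translations/fix_typography.py | ProcessTag
-- ===== SOURCE A (Python) =====
-- BAD_ELLIPSIS = "..."
--
-- GOOD_ELLIPSIS = "…"
--
-- BAD_ELLIPSIS_SPACING = " …"
--
-- GOOD_ELLIPSIS_SPACING = "…"
--
-- BAD_SINGLE_QUOTE = "\\\'%1$s\\\'"
--
-- BAD_DOUBLE_QUOTE = "\\\"%1$s\\\""
--
-- GOOD_DOUBLE_QUOTE = "“%1$s”"
--
-- def ProcessTag(oldLine, type):
--     lineString = ''.join(oldLine) \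
--         .replace(BAD_ELLIPSIS, GOOD_ELLIPSIS) \
--         .replace(BAD_ELLIPSIS_SPACING, GOOD_ELLIPSIS_SPACING) \
--         .replace(BAD_DOUBLE_QUOTE, GOOD_DOUBLE_QUOTE) \
--         .replace(BAD_SINGLE_QUOTE, GOOD_DOUBLE_QUOTE)
--     newLine = lineString.split("(?!^)")
--
--     minimizedWhitespaceLine = []
--     for idx, char in enumerate(''.join(newLine)):
--         if len(minimizedWhitespaceLine) < 1:
--             minimizedWhitespaceLine.append(char)
--             continue
--
--         # Skip the char if we're adding whitespace in the middle of a string tag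
--         if minimizedWhitespaceLine[-1] == " " and char == " " and "<" in minimizedWhitespaceLine:
--             pass
--         else:
--             minimizedWhitespaceLine.append(char)
--
--     return ''.join(minimizedWhitespaceLine).split("(?!^)")
-- ===== SOURCE B (Python) =====
-- BAD_ELLIPSIS = "..."
-- GOOD_ELLIPSIS = "…"
-- BAD_ELLIPSIS_SPACING = " …"
-- GOOD_ELLIPSIS_SPACING = "…"
-- BAD_SINGLE_QUOTE = "\\\'%1$s\\\'"
-- BAD_DOUBLE_QUOTE = "\\\"%1$s\\\""
-- GOOD_DOUBLE_QUOTE = "“%1$s”"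
--
--
-- def _collapse_spaces(text):
--     """Collapse every run of ASCII spaces in text to a single space."""
--     out = []
--     prev_space = False
--     for ch in text:
--         if not (prev_space and ch == ' '):
--             out.append(ch)
--         prev_space = ch == ' '
--     return ''.join(out)
--
--
-- def ProcessTag(oldLine, type):
--     s = ''.join(oldLine) \
--         .replace(BAD_ELLIPSIS, GOOD_ELLIPSIS) \
--         .replace(BAD_ELLIPSIS_SPACING, GOOD_ELLIPSIS_SPACING) \
--         .replace(BAD_DOUBLE_QUOTE, GOOD_DOUBLE_QUOTE) \
--         .replace(BAD_SINGLE_QUOTE, GOOD_DOUBLE_QUOTE)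
--     s = s.replace("(?!^)", "")
--     # Duplicate spaces are only collapsed inside the tag body, i.e. after
--     # the first '<'; everything up to and including it is kept verbatim.
--     i = s.find("<")
--     if i != -1:
--         s = s[:i + 1] + _collapse_spaces(s[i + 1:])
--     return s.split("(?!^)")
-- ===== Notes on version B (the rewrite author's own statement) =====
-- stated objective: faster
-- what changed: Replaces A's running accumulator loop (which re-checks the accumulator's last element and scans it for '<' at every character) by staged passes: delete the '(?!^)' marker with one replace, locate the first '<' with str.find, and collapse space runs only in the suffix with a simple boolean-state pass; the prefix is kept verbatim by slicing.
import Mathlib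
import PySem

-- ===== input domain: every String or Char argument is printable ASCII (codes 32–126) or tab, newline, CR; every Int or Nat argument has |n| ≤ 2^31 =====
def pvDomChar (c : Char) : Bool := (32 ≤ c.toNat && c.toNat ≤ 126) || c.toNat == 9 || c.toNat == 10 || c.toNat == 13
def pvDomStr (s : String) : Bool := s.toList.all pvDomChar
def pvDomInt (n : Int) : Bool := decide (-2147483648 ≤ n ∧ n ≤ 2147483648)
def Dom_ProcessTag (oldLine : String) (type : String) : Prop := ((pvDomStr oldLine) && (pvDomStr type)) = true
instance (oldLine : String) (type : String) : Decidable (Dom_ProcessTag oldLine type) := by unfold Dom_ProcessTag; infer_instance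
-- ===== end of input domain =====

-- B replaces A's accumulator loop (which re-reads the last element and scans the accumulator
-- for '<' at each character) by staged passes: one replace deleting '(?!^)', a find of the
-- first '<', and a boolean-state collapse of space runs applied to the suffix only.

-- shared string constants of the module
def pyBadEllipsis : List Char := "...".toList
def pyGoodEllipsis : List Char := "…".toList
def pyBadEllipsisSpacing : List Char := " …".toList
def pyGoodEllipsisSpacing : List Char := "…".toList
def pyBadSingleQuote : List Char := "\\'%1$s\\'".toList
def pyBadDoubleQuote : List Char := "\\\"%1$s\\\"".toList
def pyGoodDoubleQuote : List Char := "“%1$s”".toList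
def pySep : List Char := "(?!^)".toList

-- ===== PORT A =====
-- the body of A's for-loop over enumerate(''.join(newLine))
def ProcessTagStep (acc : List Char) (c : Char) : List Char :=
  if acc.length < 1 then acc ++ [c]
  else if (PySem.List.pyGet? acc (-1) == some ' ' && c == ' ' && acc.contains '<') then acc
  else acc ++ [c]

def ProcessTag (oldLine : String) (type : String) : List String :=
  let lineString : List Char :=
    PySem.Chars.replace (PySem.Chars.replace (PySem.Chars.replace (PySem.Chars.replace
      oldLine.toList pyBadEllipsis pyGoodEllipsis) pyBadEllipsisSpacing pyGoodEllipsisSpacing)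
      pyBadDoubleQuote pyGoodDoubleQuote) pyBadSingleQuote pyGoodDoubleQuote
  let newLine : List (List Char) := PySem.Chars.splitOn lineString pySep  -- .split("(?!^)"), sep ≠ ''
  let minimized : List Char :=
    (PySem.List.enumerate (PySem.Chars.join [] newLine)).foldl
      (fun acc p => ProcessTagStep acc p.2) []
  (PySem.Chars.splitOn minimized pySep).map String.ofList

-- ===== PORT B =====
-- port of _collapse_spaces: a loop carrying (out, prev_space)
def CollapseStep (st : List Char × Bool) (c : Char) : List Char × Bool :=
  (if st.2 && c == ' ' then st.1 else st.1 ++ [c], c == ' ')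

def CollapseSpaces (text : List Char) : List Char :=
  (text.foldl CollapseStep ([], false)).1

def ProcessTag_alt (oldLine : String) (type : String) : List String :=
  let s0 : List Char :=
    PySem.Chars.replace (PySem.Chars.replace (PySem.Chars.replace (PySem.Chars.replace
      oldLine.toList pyBadEllipsis pyGoodEllipsis) pyBadEllipsisSpacing pyGoodEllipsisSpacing)
      pyBadDoubleQuote pyGoodDoubleQuote) pyBadSingleQuote pyGoodDoubleQuote
  let s1 : List Char := PySem.Chars.replace s0 pySep []
  let i : Int := PySem.Chars.find s1 ['<']
  let s2 : List Char :=
    if i == -1 then s1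
    else PySem.Chars.slice s1 none (some (i + 1)) ++
         CollapseSpaces (PySem.Chars.slice s1 (some (i + 1)) none)
  (PySem.Chars.splitOn s2 pySep).map String.ofList

-- ===== PRECONDITION & SPEC =====
def Spec_ProcessTag (oldLine : String) (type : String) (out : List String) : Prop := out = ProcessTag_alt oldLine type
instance (oldLine : String) (type : String) (out : List String) : Decidable (Spec_ProcessTag oldLine type out) := by unfold Spec_ProcessTag; infer_instance

-- ===== CLAIM (what is proved, stated in full; the proofs are below) =====
def Claim_equal_ProcessTag : Prop := ∀ (oldLine : String) (type : String), Dom_ProcessTag oldLine type → Spec_ProcessTag oldLine type (ProcessTag oldLine type)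

-- ===== LEMMAS AND PROOFS =====

-- equation lemmas for the fuelled workers of PySem.Chars.replace / splitOn
theorem pvReplGo_zero (old new l acc : List Char) :
    PySem.Chars.replace.go old new 0 l acc = acc.reverse ++ l := by
  simp [PySem.Chars.replace.go]

theorem pvReplGo_nil (old new acc : List Char) (n : Nat) :
    PySem.Chars.replace.go old new (n+1) [] acc = acc.reverse := by
  simp [PySem.Chars.replace.go]

theorem pvReplGo_cons (old new acc t : List Char) (c : Char) (n : Nat) :
    PySem.Chars.replace.go old new (n+1) (c::t) acc =
      if old.isPrefixOf (c::t) then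
        PySem.Chars.replace.go old new n (List.drop old.length (c::t)) (new.reverse ++ acc)
      else PySem.Chars.replace.go old new n t (c::acc) := by
  rw [PySem.Chars.replace.go]

theorem pvSplitGo_nil (sep cur : List Char) (acc : List (List Char)) (n : Nat) :
    PySem.Chars.splitOn.go sep (n+1) [] cur acc = (cur.reverse :: acc).reverse := by
  simp [PySem.Chars.splitOn.go]

theorem pvSplitGo_cons (sep cur t : List Char) (acc : List (List Char)) (c : Char) (n : Nat) :
    PySem.Chars.splitOn.go sep (n+1) (c::t) cur acc =
      if sep.isPrefixOf (c::t) then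
        PySem.Chars.splitOn.go sep n (List.drop sep.length (c::t)) [] (cur.reverse :: acc)
      else PySem.Chars.splitOn.go sep n t (c :: cur) acc := by
  rw [PySem.Chars.splitOn.go]

theorem pvJoinNilFlatten (parts : List (List Char)) :
    PySem.Chars.join [] parts = parts.flatten := by
  induction parts with
  | nil => simp [PySem.Chars.join_nil]
  | cons p rest ih =>
    cases rest with
    | nil => simp [PySem.Chars.join_singleton]
    | cons q r => rw [PySem.Chars.join_cons_cons]; simp [ih]

-- the accumulator of replace.go (with empty replacement) factors out
theorem pvReplGo_acc (sep : List Char) :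
    ∀ (fuel : Nat) (l acc : List Char),
      PySem.Chars.replace.go sep [] fuel l acc =
        acc.reverse ++ PySem.Chars.replace.go sep [] fuel l [] := by
  intro fuel
  induction fuel with
  | zero => intro l acc; simp [pvReplGo_zero]
  | succ n ih =>
    intro l acc
    cases l with
    | nil => simp [pvReplGo_nil]
    | cons c t =>
      rw [pvReplGo_cons, pvReplGo_cons]
      split
      · rw [ih _ ([].reverse ++ acc), ih (List.drop sep.length (c::t)) ([].reverse ++ [])]
        simp
      · rw [ih t (c :: acc), ih t (c :: [])]
        simp

theorem pvSepLenPos (sep : List Char) (hsep : sep ≠ []) : 1 ≤ sep.length := by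
  cases sep with
  | nil => exact absurd rfl hsep
  | cons _ _ => simp

-- replace.go is fuel-irrelevant once the fuel covers the input
theorem pvReplGo_fuel (sep : List Char) (hsep : sep ≠ []) :
    ∀ (fuel fuel2 : Nat) (l : List Char), l.length ≤ fuel → l.length ≤ fuel2 →
      PySem.Chars.replace.go sep [] fuel l [] = PySem.Chars.replace.go sep [] fuel2 l [] := by
  intro fuel
  induction fuel with
  | zero =>
    intro fuel2 l h1 _
    have hl : l = [] := List.length_eq_zero_iff.mp (Nat.le_zero.mp h1)
    subst hl
    cases fuel2 with
    | zero => rfl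
    | succ m => simp [pvReplGo_zero, pvReplGo_nil]
  | succ n ih =>
    intro fuel2 l h1 h2
    cases l with
    | nil =>
      cases fuel2 with
      | zero => simp [pvReplGo_zero, pvReplGo_nil]
      | succ m => simp [pvReplGo_nil]
    | cons c t =>
      cases fuel2 with
      | zero => simp at h2
      | succ m =>
        rw [pvReplGo_cons, pvReplGo_cons]
        have h1' : t.length ≤ n := by simp at h1; omega
        have h2' : t.length ≤ m := by simp at h2; omega
        split
        · have hd : (List.drop sep.length (c::t)).length ≤ t.length := by
            have := pvSepLenPos sep hsep
            simp only [List.length_drop, List.length_cons]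
            omega
          simpa using ih m (List.drop sep.length (c::t)) (le_trans hd h1') (le_trans hd h2')
        · rw [pvReplGo_acc sep n t [c], pvReplGo_acc sep m t [c]]
          rw [ih m t h1' h2']

-- flatten of the split worker = deletion of the separator
theorem pvSplitGo_flatten (sep : List Char) (hsep : sep ≠ []) :
    ∀ (fuel : Nat) (l cur : List Char) (acc : List (List Char)), l.length < fuel →
      (PySem.Chars.splitOn.go sep fuel l cur acc).flatten =
        acc.reverse.flatten ++ cur.reverse ++ PySem.Chars.replace.go sep [] l.length l [] := by
  intro fuel
  induction fuel with
  | zero => intro l cur acc h; omega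
  | succ n ih =>
    intro l cur acc h
    cases l with
    | nil => simp [pvSplitGo_nil, pvReplGo_zero]
    | cons c t =>
      rw [pvSplitGo_cons]
      simp only [List.length_cons, pvReplGo_cons]
      have ht : t.length < n := by simp at h; omega
      split
      · have hd : (List.drop sep.length (c::t)).length ≤ t.length := by
          have := pvSepLenPos sep hsep
          simp only [List.length_drop, List.length_cons]
          omega
        rw [ih _ [] (cur.reverse :: acc) (by omega)]
        rw [pvReplGo_fuel sep hsep (List.drop sep.length (c::t)).length t.length _ le_rfl hd]
        simp
      · rw [ih t (c :: cur) acc ht]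
        rw [pvReplGo_acc sep t.length t [c]]
        simp

-- ''.join(s.split(sep)) = s.replace(sep, '')
theorem pvJoinSplit (s sep : List Char) (hsep : sep ≠ []) :
    PySem.Chars.join [] (PySem.Chars.splitOn s sep) = PySem.Chars.replace s sep [] := by
  rw [pvJoinNilFlatten]
  unfold PySem.Chars.splitOn PySem.Chars.replace
  rw [pvSplitGo_flatten sep hsep (s.length + 1) s [] [] (by omega)]
  have : sep.isEmpty = false := by simpa [List.isEmpty_iff] using hsep
  simp [this]

-- A's loop over enumerate ignores the indices
theorem pvFoldlEnum (xs : List Char) :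
    ∀ (st : Int) (init : List Char),
      (PySem.List.enumerate xs st).foldl (fun acc p => ProcessTagStep acc p.2) init =
        xs.foldl ProcessTagStep init := by
  induction xs with
  | nil => intro st init; simp [PySem.List.enumerate_nil]
  | cons c t ih => intro st init; rw [PySem.List.enumerate_cons]; simp [List.foldl_cons, ih]

-- reference collapse: one space survives from each run, state = "previous char was a space"
def pvCollapse2 : Bool → List Char → List Char
  | _, [] => []
  | b, c :: l => if b && (c == ' ') then pvCollapse2 b l else c :: pvCollapse2 (c == ' ') l

theorem pvCollapse2_nil (b : Bool) : pvCollapse2 b [] = [] := rfl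

theorem pvCollapse2_cons (b : Bool) (c : Char) (l : List Char) :
    pvCollapse2 b (c :: l) =
      if b && (c == ' ') then pvCollapse2 b l else c :: pvCollapse2 (c == ' ') l := rfl

theorem pvCollapseFold (l : List Char) :
    ∀ (out : List Char) (b : Bool), (l.foldl CollapseStep (out, b)).1 = out ++ pvCollapse2 b l := by
  induction l with
  | nil => intro out b; simp [pvCollapse2_nil]
  | cons c t ih =>
    intro out b
    simp only [List.foldl_cons, CollapseStep, pvCollapse2_cons]
    by_cases hb : (b && (c == ' ')) = true
    · have hc : (c == ' ') = true := by
        cases b <;> simp_all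
      simp only [hb, if_true]
      rw [ih out (c == ' ')]
      have : b = true := by cases b <;> simp_all
      simp [this, hc]
    · simp only [hb]
      rw [if_neg (by simpa using hb), if_neg (by simpa using hb)]
      rw [ih (out ++ [c]) (c == ' ')]
      simp

theorem pvStepAppend (acc : List Char) (c : Char) (hc : c ≠ ' ') :
    ProcessTagStep acc c = acc ++ [c] := by
  unfold ProcessTagStep
  have : (c == ' ') = false := by simpa using hc
  simp [this]

theorem pvGetNegOne (l : List Char) (h : l ≠ []) :
    PySem.List.pyGet? l (-1) = some (l.getLast h) := by
  have hlen : 1 ≤ l.length := by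
    cases l with
    | nil => exact absurd rfl h
    | cons _ _ => simp
  simp only [PySem.List.pyGet?, PySem.List.pyIdx?]
  norm_num
  rw [if_pos (by exact_mod_cast hlen)]
  simp only [Option.bind_some, Option.some.injEq]
  rw [List.getLast_eq_getElem]
  exact List.getElem?_eq_getElem (by omega)

-- phase 1: before any '<' has been emitted, the loop copies every character
theorem pvPhase1 (l : List Char) :
    ∀ (acc : List Char), '<' ∉ acc → '<' ∉ l →
      l.foldl ProcessTagStep acc = acc ++ l := by
  induction l with
  | nil => intro acc _ _; simp
  | cons c t ih =>
    intro acc hacc hl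
    have hcontains : acc.contains '<' = false := by simpa using hacc
    have hc : c ≠ '<' := fun h => hl (by simp [h])
    have hstep : ProcessTagStep acc c = acc ++ [c] := by
      unfold ProcessTagStep
      have : (PySem.List.pyGet? acc (-1) == some ' ' && c == ' ' && acc.contains '<') = false := by
        simp
        exact fun _ _ => hacc
      rw [this]
      simp
    have hacc' : '<' ∉ acc ++ [c] := by
      simp only [List.mem_append, List.mem_singleton]
      rintro (h | h)
      · exact hacc h
      · exact hc h.symm
    have hl' : '<' ∉ t := fun h => hl (List.mem_cons_of_mem _ h)
    rw [List.foldl_cons, hstep, ih (acc ++ [c]) hacc' hl']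
    simp

-- phase 2: once '<' is in the accumulator, the loop collapses space runs
theorem pvPhase2 (l : List Char) :
    ∀ (acc : List Char) (hne : acc ≠ []), '<' ∈ acc →
      l.foldl ProcessTagStep acc = acc ++ pvCollapse2 (acc.getLast hne == ' ') l := by
  induction l with
  | nil => intro acc hne _; simp [pvCollapse2_nil]
  | cons c t ih =>
    intro acc hne hmem
    have hlen : ¬ acc.length < 1 := by
      cases acc with
      | nil => exact absurd rfl hne
      | cons _ _ => simp
    have hcontains : acc.contains '<' = true := by simpa using hmem
    have hget : PySem.List.pyGet? acc (-1) = some (acc.getLast hne) := pvGetNegOne acc hne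
    by_cases hcase : ((acc.getLast hne == ' ') && (c == ' ')) = true
    · have hstep : ProcessTagStep acc c = acc := by
        unfold ProcessTagStep
        rw [if_neg hlen, if_pos]
        simp only [hget, hcontains, Bool.and_true]
        cases h1 : (acc.getLast hne == ' ') <;> cases h2 : (c == ' ') <;> simp_all
      rw [List.foldl_cons, hstep, ih acc hne hmem]
      have h1 : (acc.getLast hne == ' ') = true := by cases h : (acc.getLast hne == ' ') <;> simp_all
      have h2 : (c == ' ') = true := by cases h : (c == ' ') <;> simp_all
      rw [pvCollapse2_cons]
      simp [h1, h2]
    · have hstep : ProcessTagStep acc c = acc ++ [c] := by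
        unfold ProcessTagStep
        rw [if_neg hlen, if_neg]
        simp only [hget]
        intro hcon
        apply hcase
        cases h1 : (acc.getLast hne == ' ') <;> cases h2 : (c == ' ') <;> simp_all
      have hne' : acc ++ [c] ≠ [] := by simp
      have hlast' : (acc ++ [c]).getLast hne' = c := by
        simp
      rw [List.foldl_cons, hstep, ih (acc ++ [c]) hne' (by simp [hmem]), hlast']
      rw [pvCollapse2_cons, if_neg (by simpa using hcase)]
      simp

-- a singleton prefix is a head
theorem pvSingletonPrefix (a : Char) (l : List Char) (h : [a] <+: l) :
    ∃ t, l = a :: t := by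
  obtain ⟨t, ht⟩ := h
  exact ⟨t, ht.symm⟩

-- the core: A's loop equals B's pivot-and-collapse on any character list
theorem pvCore (cs : List Char) :
    cs.foldl ProcessTagStep [] =
      (if PySem.Chars.find cs ['<'] == -1 then cs
       else PySem.Chars.slice cs none (some (PySem.Chars.find cs ['<'] + 1)) ++
            CollapseSpaces (PySem.Chars.slice cs (some (PySem.Chars.find cs ['<'] + 1)) none)) := by
  by_cases hfind : PySem.Chars.find cs ['<'] = -1
  · have hnotmem : '<' ∉ cs := by
      have := (PySem.Chars.find_eq_neg_one_iff cs ['<']).mp hfind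
      intro hm
      exact this ((List.singleton_infix_iff '<' cs).mpr hm)
    rw [if_pos (by simpa using hfind)]
    simpa using pvPhase1 cs [] (by simp) hnotmem
  · rw [if_neg (by simpa using hfind)]
    set k : Int := PySem.Chars.find cs ['<'] with hk
    have hk0 : 0 ≤ k := by
      have := PySem.Chars.neg_one_le_find cs ['<']
      omega
    obtain ⟨hpre, hmin⟩ := PySem.Chars.find_spec (s := cs) (sub := ['<']) hk0
    set kN : Nat := k.toNat with hkN
    obtain ⟨t, ht⟩ := pvSingletonPrefix '<' (List.drop kN cs) hpre
    have hklen : kN < cs.length := by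
      have : (List.drop kN cs).length = cs.length - kN := List.length_drop ..
      rw [ht] at this
      simp at this
      omega
    have htdrop : t = List.drop (kN + 1) cs := by
      have : List.drop (kN + 1) cs = List.drop 1 (List.drop kN cs) := by
        rw [List.drop_drop]
      rw [this, ht]
      simp
    have hdecomp : cs = List.take kN cs ++ '<' :: List.drop (kN + 1) cs := by
      conv_lhs => rw [← List.take_append_drop kN cs]
      rw [ht, htdrop]
    have hnotmem : '<' ∉ List.take kN cs := by
      intro hm
      obtain ⟨i, hi, hig⟩ := List.mem_iff_getElem.mp hm
      have hilt : i < kN := by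
        have := hi
        simp only [List.length_take] at this
        omega
      have hilen : i < cs.length := by omega
      refine hmin i hilt ?_
      rw [List.drop_eq_getElem_cons hilen]
      have hci : cs[i] = '<' := by
        rw [← hig]
        exact (List.getElem_take).symm
      rw [hci]
      exact ⟨List.drop (i + 1) cs, rfl⟩
    -- evaluate A's loop
    have hA : cs.foldl ProcessTagStep [] =
        List.take kN cs ++ ['<'] ++ pvCollapse2 false (List.drop (kN + 1) cs) := by
      conv_lhs => rw [hdecomp]
      rw [show (List.take kN cs ++ '<' :: List.drop (kN + 1) cs) =
            (List.take kN cs ++ ['<']) ++ List.drop (kN + 1) cs by simp]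
      rw [List.foldl_append]
      rw [List.foldl_append]
      rw [pvPhase1 (List.take kN cs) [] (by simp) hnotmem]
      simp only [List.nil_append]
      rw [show (List.foldl ProcessTagStep (List.take kN cs) ['<']) =
            List.take kN cs ++ ['<'] by
        simpa using pvStepAppend (List.take kN cs) '<' (by decide)]
      have hne : List.take kN cs ++ ['<'] ≠ [] := by simp
      rw [pvPhase2 (List.drop (kN + 1) cs) (List.take kN cs ++ ['<']) hne (by simp)]
      have : (List.take kN cs ++ ['<']).getLast hne = '<' := by simp
      rw [this]
      simp only [List.append_assoc, List.singleton_append]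
      rfl
    -- evaluate B's slices
    have hcsk : cs[kN] = '<' := by
      have h1 := List.drop_eq_getElem_cons (l := cs) hklen
      rw [ht] at h1
      exact (List.cons.injEq .. ▸ h1).1.symm
    have hslice1 : PySem.Chars.slice cs none (some (k + 1)) = List.take kN cs ++ ['<'] := by
      rw [PySem.Chars.slice_eq_listSlice, PySem.List.slice_to cs (by omega)]
      have hto : (k + 1).toNat = kN + 1 := by omega
      rw [hto, List.take_succ, List.getElem?_eq_getElem hklen, hcsk]
      rfl
    have hslice2 : PySem.Chars.slice cs (some (k + 1)) none = List.drop (kN + 1) cs := by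
      rw [PySem.Chars.slice_eq_listSlice, PySem.List.slice_from cs (by omega)]
      have : (k + 1).toNat = kN + 1 := by omega
      rw [this]
    rw [hA, hslice1, hslice2]
    unfold CollapseSpaces
    rw [pvCollapseFold (List.drop (kN + 1) cs) [] false]
    simp

-- ===== VERDICT (by name: the statement is the Claim_ definition above) =====
theorem ProcessTag_spec : Claim_equal_ProcessTag := by
  intro oldLine type _
  unfold Spec_ProcessTag ProcessTag ProcessTag_alt
  simp only []
  have hsep : pySep ≠ [] := by decide
  rw [pvFoldlEnum, pvJoinSplit _ pySep hsep, pvCore]
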